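-- pv_equiv track=rewrite | github.com/ugurcan-sonmez-95/HackerRank | Algorithms/Implementation/Absolute_Permutation/main.py | smallestAbsolutePermutation
-- ===== SOURCE A (Python) =====
-- def smallestAbsolutePermutation(n, k):
--     perm = []
--     if (k == 0):
--         for i in range(1, n+1):
--             perm.append(i)
--     elif (n % (k*2) != 0):
--         perm.append(-1)
--     else:
--         bool_check = True
--         for j in range(1, n+1):
--             if (bool_check):
--                 perm.append(j+k)
--             else:
--                 perm.append(j-k)
--             if (j % k == 0):
--                 if (bool_check):
--                     bool_check = False
--                 else:
--                     bool_check = True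
--     return perm
-- ===== SOURCE B (Python) =====
-- def smallestAbsolutePermutation(n, k):
--     if k == 0:
--         return list(range(1, n + 1))
--     if n % (2 * k) != 0:
--         return [-1]
--     perm = []
--     for s in range(1, n + 1, 2 * k):
--         perm.extend(range(s + k, s + 2 * k))
--         perm.extend(range(s, s + k))
--     return perm
-- ===== Notes on version B (the rewrite author's own statement) =====
-- stated objective: simpler
-- what changed: B keeps the k==0 and non-divisible guards but builds the permutation block-by-block (for each block start s in range(1, n+1, 2*k) it extends with range(s+k, s+2*k) then range(s, s+k)) instead of A's per-element loop with a toggling boolean flag and a per-element j % k test.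
-- outside the precondition, e.g. on smallestAbsolutePermutation(4, -2): A returns [-1, 0, 5, 6], B returns []
import Mathlib
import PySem

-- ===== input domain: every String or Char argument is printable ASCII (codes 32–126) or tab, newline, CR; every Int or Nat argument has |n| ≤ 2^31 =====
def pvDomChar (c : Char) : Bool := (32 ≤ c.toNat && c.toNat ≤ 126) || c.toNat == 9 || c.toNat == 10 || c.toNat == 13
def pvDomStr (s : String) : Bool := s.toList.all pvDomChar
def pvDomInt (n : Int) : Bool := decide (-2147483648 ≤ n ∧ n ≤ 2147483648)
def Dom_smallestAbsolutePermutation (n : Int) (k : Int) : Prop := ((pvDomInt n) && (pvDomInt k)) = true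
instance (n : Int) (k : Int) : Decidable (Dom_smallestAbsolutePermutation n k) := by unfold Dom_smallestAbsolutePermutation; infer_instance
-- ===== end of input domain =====

-- B builds the permutation block-by-block (two ranges per 2k-block) instead of A's
-- per-element loop with a toggling boolean; objective: simpler, same cost.

-- ===== PORT A =====
-- A's else-branch loop body: append j+k or j-k by the flag, flip the flag when j % k == 0
def pvStepA (k : Int) (st : List Int × Bool) (j : Int) : List Int × Bool :=
  (if st.2 then st.1 ++ [j + k] else st.1 ++ [j - k],
   if PySem.Int.mod j k = 0 then (if st.2 then false else true) else st.2)

def smallestAbsolutePermutation (n : Int) (k : Int) : List Int :=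
  if k = 0 then
    (PySem.List.pyRange 1 (n + 1) 1).foldl (fun perm i => perm ++ [i]) []
  else if PySem.Int.mod n (k * 2) ≠ 0 then
    ([] : List Int) ++ [-1]
  else
    ((PySem.List.pyRange 1 (n + 1) 1).foldl (pvStepA k) ([], true)).1

-- ===== PORT B =====
-- B's loop body: extend perm with range(s+k, s+2k) then range(s, s+k)
def pvBlockB (k : Int) (perm : List Int) (s : Int) : List Int :=
  (perm ++ PySem.List.pyRange (s + k) (s + 2 * k) 1) ++ PySem.List.pyRange s (s + k) 1

def smallestAbsolutePermutation_alt (n : Int) (k : Int) : List Int :=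
  if k = 0 then
    PySem.List.pyRange 1 (n + 1) 1
  else if PySem.Int.mod n (2 * k) ≠ 0 then
    [-1]
  else
    (PySem.List.pyRange 1 (n + 1) (2 * k)).foldl (pvBlockB k) []

-- ===== PRECONDITION & SPEC =====
-- Pre_ excludes only negative k with n a multiple of 2*k: k < 0 is outside the
-- problem's natural domain (HackerRank guarantees k ≥ 0) and there A's toggling
-- loop happens to emit an accidental non-permutation (e.g. A(4,-2) = [-1,0,5,6])
-- while B's positively-stepped range is empty.
def Pre_smallestAbsolutePermutation (n : Int) (k : Int) : Prop :=
  0 ≤ k ∨ PySem.Int.mod n (2 * k) ≠ 0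
instance (n : Int) (k : Int) : Decidable (Pre_smallestAbsolutePermutation n k) := by
  unfold Pre_smallestAbsolutePermutation; infer_instance

def pvWitness_smallestAbsolutePermutation : Int × Int := (6, 1)

def Spec_smallestAbsolutePermutation (n : Int) (k : Int) (out : List Int) : Prop :=
  out = smallestAbsolutePermutation_alt n k
instance (n : Int) (k : Int) (out : List Int) : Decidable (Spec_smallestAbsolutePermutation n k out) := by
  unfold Spec_smallestAbsolutePermutation; infer_instance

-- ===== CLAIM (what is proved, stated in full; the proofs are below) =====
def Claim_equal_smallestAbsolutePermutation : Prop :=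
  ∀ (n : Int) (k : Int), Dom_smallestAbsolutePermutation n k →
    Pre_smallestAbsolutePermutation n k →
    Spec_smallestAbsolutePermutation n k (smallestAbsolutePermutation n k)

-- ===== LEMMAS AND PROOFS =====

-- a run of c consecutive steps whose LAST index is the only multiple of k:
-- the flag stays fixed through the run and flips exactly at the end
theorem pvRunAux (k : Int) (_hk : 0 < k) :
    ∀ (c : Nat) (j0 : Int) (acc : List Int) (b : Bool), 0 < c → (c : Int) ≤ k →
      k ∣ (j0 + c - 1) →
      (PySem.List.pyRange j0 (j0 + c) 1).foldl (pvStepA k) (acc, b)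
        = (acc ++ (PySem.List.pyRange j0 (j0 + c) 1).map (fun j => if b then j + k else j - k), !b) := by
  intro c
  induction c with
  | zero => intro _ _ _ h; omega
  | succ c ih =>
    intro j0 acc b _ hle hdvd
    rcases Nat.eq_zero_or_pos c with hc | hc
    · subst hc
      have hone : j0 + ((1 : Nat) : Int) = j0 + 1 := by push_cast; ring
      rw [hone, PySem.List.pyRange_one_singleton]
      have hj0 : k ∣ j0 := by
        have : j0 + ((1 : Nat) : Int) - 1 = j0 := by push_cast; ring
        rwa [this] at hdvd
      have hm : PySem.Int.mod j0 k = 0 := (PySem.Int.mod_eq_zero_iff_dvd j0 k).mpr hj0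
      cases b <;> simp [pvStepA, hm]
    · have hcons : PySem.List.pyRange j0 (j0 + ((c + 1 : Nat) : Int)) 1
          = j0 :: PySem.List.pyRange (j0 + 1) (j0 + ((c + 1 : Nat) : Int)) 1 := by
        apply PySem.List.pyRange_one_cons
        push_cast; omega
      have hnd : ¬ k ∣ j0 := by
        intro hdj
        have h1 : k ∣ (c : Int) := by
          have : (c : Int) = (j0 + ((c + 1 : Nat) : Int) - 1) - j0 := by push_cast; ring
          rw [this]; exact dvd_sub hdvd hdj
        have := Int.le_of_dvd (by exact_mod_cast hc) h1
        push_cast at hle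
        omega
      have hm : PySem.Int.mod j0 k ≠ 0 := fun h =>
        hnd ((PySem.Int.mod_eq_zero_iff_dvd j0 k).mp h)
      have hrw : j0 + ((c + 1 : Nat) : Int) = (j0 + 1) + (c : Int) := by push_cast; ring
      have hih := ih (j0 + 1) (if b then acc ++ [j0 + k] else acc ++ [j0 - k]) b hc
        (by push_cast at hle ⊢; omega)
        (by rw [show j0 + 1 + (c : Int) - 1 = j0 + ((c + 1 : Nat) : Int) - 1 by push_cast; ring]; exact hdvd)
      rw [hcons, List.foldl_cons]
      have hstep : pvStepA k (acc, b) j0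
          = (if b then acc ++ [j0 + k] else acc ++ [j0 - k], b) := by
        cases b <;> simp [pvStepA, hm]
      rw [hstep, hrw] at *
      rw [hih, List.map_cons]
      cases b <;> simp

-- shifting a unit range by ±k
theorem pvRangeShift (a b k : Int) :
    (PySem.List.pyRange a b 1).map (fun j => j + k) = PySem.List.pyRange (a + k) (b + k) 1 := by
  rw [PySem.List.pyRange_one a b, PySem.List.pyRange_one (a + k) (b + k), List.map_map]
  have : b + k - (a + k) = b - a := by ring
  rw [this]
  apply List.map_congr_left
  intro x _
  simp; ring

theorem pvRangeShiftNeg (a b k : Int) :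
    (PySem.List.pyRange a b 1).map (fun j => j - k) = PySem.List.pyRange (a - k) (b - k) 1 := by
  have := pvRangeShift a b (-k)
  simpa [sub_eq_add_neg] using this

-- one full 2k-period starting at s ≡ 1 (mod k) with the flag True:
-- A appends exactly B's block and returns to the flag True
theorem pvPeriod (k : Int) (hk : 0 < k) (s : Int) (acc : List Int) (hs : k ∣ s - 1) :
    (PySem.List.pyRange s (s + 2 * k) 1).foldl (pvStepA k) (acc, true)
      = (pvBlockB k acc s, true) := by
  have hsplit := PySem.List.pyRange_one_append s (s + k) (s + 2 * k) (by omega) (by omega)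
  rw [hsplit, List.foldl_append]
  have hkc : ((k.toNat : Nat) : Int) = k := Int.toNat_of_nonneg (le_of_lt hk)
  have h1 := pvRunAux k hk k.toNat s acc true (by omega) (by omega)
    (by rw [hkc, show s + k - 1 = (s - 1) + k by ring]; exact dvd_add hs (dvd_refl k))
  rw [hkc] at h1
  simp only [Bool.not_true, reduceIte] at h1
  rw [h1]
  have h2 := pvRunAux k hk k.toNat (s + k)
    (acc ++ (PySem.List.pyRange s (s + k) 1).map (fun j => j + k)) false
    (by omega) (by omega)
    (by rw [hkc, show s + k + k - 1 = (s - 1) + (k + k) by ring]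
        exact dvd_add hs (dvd_add (dvd_refl k) (dvd_refl k)))
  rw [hkc, show s + k + k = s + 2 * k by ring] at h2
  simp only [Bool.not_false, Bool.false_eq_true, if_false] at h2
  rw [h2]
  have e1 : (PySem.List.pyRange s (s + k) 1).map (fun j => j + k)
      = PySem.List.pyRange (s + k) (s + 2 * k) 1 := by
    rw [pvRangeShift]; congr 1; ring
  have e2 : (PySem.List.pyRange (s + k) (s + 2 * k) 1).map (fun j => j - k)
      = PySem.List.pyRange s (s + k) 1 := by
    rw [pvRangeShiftNeg]; congr 1 <;> ring
  rw [e1, e2]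
  rfl

-- positively-stepped pyRange as a map over List.range
theorem pvStepRange (k : Int) (hk : 0 < k) (s : Int) (m : Nat) :
    PySem.List.pyRange s (s + 2 * k * m) (2 * k)
      = (List.range m).map (fun t : Nat => s + 2 * k * (t : Int)) := by
  rw [PySem.List.pyRange_of_pos s (s + 2 * k * m) (by omega)]
  rcases Nat.eq_zero_or_pos m with hm | hm
  · subst hm; simp
  · have hlt : s < s + 2 * k * m := by
      have : (0 : Int) < 2 * k * m := by positivity
      omega
    rw [if_pos hlt]
    have harg : ((s + 2 * k * (m : Int) - s + 2 * k - 1) / (2 * k)).toNat = m := by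
      rw [show s + 2 * k * (m : Int) - s + 2 * k - 1 = (2 * k - 1) + (m : Int) * (2 * k) by ring,
          Int.add_mul_ediv_right _ _ (by omega : (2 : Int) * k ≠ 0),
          Int.ediv_eq_zero_of_lt (by omega) (by omega)]
      simp
    rw [harg]

-- main block induction: A's else-loop over m full periods equals B's fold over block starts
theorem pvBlocks (k : Int) (hk : 0 < k) :
    ∀ (m : Nat) (s : Int) (acc : List Int), k ∣ s - 1 →
      ((PySem.List.pyRange s (s + 2 * k * m) 1).foldl (pvStepA k) (acc, true)).1
        = ((List.range m).map (fun t : Nat => s + 2 * k * (t : Int))).foldl (pvBlockB k) acc := by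
  intro m
  induction m with
  | zero =>
    intro s acc _
    simp
  | succ m ih =>
    intro s acc hs
    have hbound : s + 2 * k ≤ s + 2 * k * ((m + 1 : Nat) : Int) := by
      have : (0 : Int) ≤ 2 * k * m := by positivity
      push_cast; nlinarith
    have hsplit := PySem.List.pyRange_one_append s (s + 2 * k) (s + 2 * k * ((m + 1 : Nat) : Int))
      (by omega) hbound
    rw [hsplit, List.foldl_append, pvPeriod k hk s acc hs]
    have hrest : s + 2 * k * ((m + 1 : Nat) : Int) = (s + 2 * k) + 2 * k * (m : Int) := by
      push_cast; ring
    rw [hrest, ih (s + 2 * k) (pvBlockB k acc s)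
      (by rw [show s + 2 * k - 1 = (s - 1) + k * 2 by ring]; exact dvd_add hs (Dvd.intro 2 rfl))]
    rw [List.range_succ_eq_map, List.map_cons, List.foldl_cons, List.map_map]
    congr 1
    · simp
    · apply List.map_congr_left; intro x _; simp; ring

-- ===== VERDICT (by name: the statement is the Claim_ definition above) =====
theorem smallestAbsolutePermutation_spec : Claim_equal_smallestAbsolutePermutation := by
  intro n k _ hpre
  unfold Spec_smallestAbsolutePermutation smallestAbsolutePermutation smallestAbsolutePermutation_alt
  by_cases hk0 : k = 0
  · subst hk0
    rw [if_pos rfl, if_pos rfl, PySem.List.foldl_append_singleton]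
    simp
  · rw [if_neg hk0, if_neg hk0, show k * 2 = 2 * k by ring]
    by_cases hm : PySem.Int.mod n (2 * k) = 0
    · rw [if_neg (by simpa using hm), if_neg (by simpa using hm)]
      have hkpos : 0 < k := by
        rcases hpre with h | h
        · omega
        · exact absurd hm h
      have hdvd : (2 * k) ∣ n := (PySem.Int.mod_eq_zero_iff_dvd n (2 * k)).mp hm
      by_cases hn : n ≤ 0
      · -- n ≤ 0: both loops run over empty ranges
        rw [PySem.List.pyRange_one_eq_nil (by omega : n + 1 ≤ 1)]
        rw [PySem.List.pyRange_of_pos 1 (n + 1) (by omega), if_neg (by omega)]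
        simp
      · have hn : 0 < n := by omega
        obtain ⟨q, hq⟩ := hdvd
        have hqpos : 0 < q := by nlinarith
        have hqm : q = ((q.toNat : Nat) : Int) := (Int.toNat_of_nonneg (le_of_lt hqpos)).symm
        have hn1 : n + 1 = 1 + 2 * k * ((q.toNat : Nat) : Int) := by rw [← hqm]; omega
        rw [hn1, pvBlocks k hkpos q.toNat 1 [] (by simp),
            pvStepRange k hkpos 1 q.toNat]
    · rw [if_pos (by simpa using hm), if_pos (by simpa using hm)]
      rfl
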